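-- pv_equiv track=rewrite | github.com/Gheist23/arc-raiders-advanced-tooltip | arc_raiders_tooltip.py | convert_trailing_roman_numeral
-- ===== SOURCE A (Python) =====
-- def convert_trailing_roman_numeral(name: str) -> str:
--     if not name:
--         return name
--
--     s = name.rstrip()
--     if not s:
--         return name
--
--     if len(s.split()) < 2:
--         return name
--
--     patterns = [
--         ("IV", "4"),
--         ("III", "3"),
--         ("II", "2"),
--         ("I", "1"),
--     ]
--
--     for roman, digit in patterns:
--         L = len(roman)
--         if len(s) < L:
--             continue
--
--         tail_original = s[-L:]
--
--         tail_norm = tail_original.upper()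
--         tail_norm = tail_norm.replace("|", "I").replace("L", "I")
--
--         if tail_norm == roman:
--             new_s = s[:-L] + digit
--             return new_s
--
--     return name
-- ===== SOURCE B (Python) =====
-- def _norm(c):
--     c = c.upper()
--     return 'I' if c in ('|', 'L') else c
--
--
-- def _i_run(rev, cap):
--     if cap == 0 or not rev or rev[0] != 'I':
--         return 0
--     return 1 + _i_run(rev[1:], cap - 1)
--
--
-- def convert_trailing_roman_numeral(name: str) -> str:
--     if not name:
--         return name
--
--     s = name.rstrip()
--     if not s:
--         return name
--
--     if len(s.split()) < 2:
--         return name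
--
--     rev = [_norm(c) for c in reversed(s)]
--     if len(rev) >= 2 and rev[0] == 'V' and rev[1] == 'I':
--         return s[:-2] + '4'
--
--     k = _i_run(rev, 3)
--     if k > 0:
--         return s[:-k] + str(k)
--     return name
-- ===== Notes on version B (the rewrite author's own statement) =====
-- stated objective: alternative
-- what changed: A tries four tail patterns (IV, III, II, I) each with its own slice-normalize-compare pass; B does one reverse scan of the normalized characters, special-casing a trailing V preceded by I and otherwise counting the trailing run of normalized I characters capped at 3.
import Mathlib
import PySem

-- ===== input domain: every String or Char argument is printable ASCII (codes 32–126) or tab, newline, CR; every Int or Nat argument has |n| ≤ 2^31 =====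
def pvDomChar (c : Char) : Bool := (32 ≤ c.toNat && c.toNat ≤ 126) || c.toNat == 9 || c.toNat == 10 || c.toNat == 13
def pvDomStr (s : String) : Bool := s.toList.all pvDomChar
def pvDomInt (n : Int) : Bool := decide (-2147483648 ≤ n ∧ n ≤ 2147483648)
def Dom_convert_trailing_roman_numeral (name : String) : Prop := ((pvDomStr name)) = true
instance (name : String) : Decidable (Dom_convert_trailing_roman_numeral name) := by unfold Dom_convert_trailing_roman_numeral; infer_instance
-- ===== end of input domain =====

-- B replaces A's ordered four-pattern tail-matching loop by a single reverse scan: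
-- normalize characters from the end, special-case a 'V' preceded by 'I' (→ '4'),
-- otherwise count the trailing run of normalized 'I's capped at 3 (→ its digit). Objective: alternative.


-- ===== PORT A =====
-- A's `for roman, digit in patterns` loop; `none` = the loop falls through to `return name`.
def pvPatLoop (s : List Char) : List (List Char × List Char) → Option (List Char)
  | [] => none
  | (roman, digit) :: rest =>
    if s.length < roman.length then pvPatLoop s rest
    else
      let tail_original := PySem.List.slice s (some (-(roman.length : Int))) none
      let tail_norm := PySem.Chars.replace (PySem.Chars.replace (PySem.Chars.upper tail_original) ['|'] ['I']) ['L'] ['I']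
      if tail_norm = roman then some (PySem.List.slice s none (some (-(roman.length : Int))) ++ digit)
      else pvPatLoop s rest

def convert_trailing_roman_numeral (name : String) : String :=
  if name = "" then name
  else
    let s := PySem.Chars.rstrip name.toList
    if s = [] then name
    else if (PySem.Chars.split₀ s).length < 2 then name
    else
      match pvPatLoop s [(['I','V'], ['4']), (['I','I','I'], ['3']), (['I','I'], ['2']), (['I'], ['1'])] with
      | some cs => String.ofList cs
      | none => name

-- ===== PORT B =====
def pvNorm (c : Char) : Char :=
  let u := PySem.Chars.upperChar c
  if u = '|' ∨ u = 'L' then 'I' else u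

def pvIRun : List Char → Nat → Nat
  | _, 0 => 0
  | [], _ + 1 => 0
  | c :: rest, cap + 1 => if c = 'I' then 1 + pvIRun rest cap else 0

-- the tail decision of B; `none` = `return name`
def pvAltCore (s : List Char) : Option (List Char) :=
  let rev := s.reverse.map pvNorm
  if 2 ≤ rev.length ∧ rev[0]? = some 'V' ∧ rev[1]? = some 'I' then
    some (PySem.List.slice s none (some (-2)) ++ ['4'])
  else
    let k := pvIRun rev 3
    if 0 < k then some (PySem.List.slice s none (some (-(k : Int))) ++ PySem.Int.toChars (k : Int))
    else none

def convert_trailing_roman_numeral_alt (name : String) : String :=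
  if name = "" then name
  else
    let s := PySem.Chars.rstrip name.toList
    if s = [] then name
    else if (PySem.Chars.split₀ s).length < 2 then name
    else
      match pvAltCore s with
      | some cs => String.ofList cs
      | none => name

-- ===== PRECONDITION & SPEC =====
def Spec_convert_trailing_roman_numeral (name : String) (out : String) : Prop := out = convert_trailing_roman_numeral_alt name
instance (name : String) (out : String) : Decidable (Spec_convert_trailing_roman_numeral name out) := by unfold Spec_convert_trailing_roman_numeral; infer_instance

-- ===== CLAIM (what is proved, stated in full; the proofs are below) =====
def Claim_equal_convert_trailing_roman_numeral : Prop := ∀ (name : String), Dom_convert_trailing_roman_numeral name → Spec_convert_trailing_roman_numeral name (convert_trailing_roman_numeral name)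

-- ===== LEMMAS AND PROOFS =====

lemma pvReplaceGoSingleton (a b : Char) : ∀ (fuel : Nat) (l acc : List Char), l.length ≤ fuel →
    PySem.Chars.replace.go [a] [b] fuel l acc = acc.reverse ++ l.map (fun c => if c = a then b else c) := by
  intro fuel
  induction fuel with
  | zero =>
    intro l acc h
    have : l = [] := List.eq_nil_of_length_eq_zero (Nat.le_zero.mp h)
    subst this
    simp [PySem.Chars.replace.go]
  | succ n ih =>
    intro l acc h
    cases l with
    | nil => simp [PySem.Chars.replace.go]
    | cons c t =>
      simp only [PySem.Chars.replace.go, List.isPrefixOf, Bool.and_true]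
      by_cases hc : c = a
      · simp only [hc, beq_self_eq_true, if_pos]
        rw [ih _ _ (by simpa using Nat.le_of_succ_le_succ h)]
        simp
      · have : (a == c) = false := by simp [Ne.symm hc]
        simp only [this, Bool.false_eq_true, if_false]
        rw [ih _ _ (by simpa using Nat.le_of_succ_le_succ h)]
        simp [hc]

lemma pvReplaceSingleton (s : List Char) (a b : Char) :
    PySem.Chars.replace s [a] [b] = s.map (fun c => if c = a then b else c) := by
  simp only [PySem.Chars.replace, List.isEmpty_cons, Bool.false_eq_true, if_false]
  rw [pvReplaceGoSingleton a b s.length s [] (le_refl _)]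
  simp

lemma pvNormMap (t : List Char) :
    PySem.Chars.replace (PySem.Chars.replace (PySem.Chars.upper t) ['|'] ['I']) ['L'] ['I'] = t.map pvNorm := by
  rw [pvReplaceSingleton, pvReplaceSingleton]
  simp only [PySem.Chars.upper, List.map_map]
  congr 1
  funext c
  simp only [Function.comp, pvNorm]
  split_ifs with h1 h2 h3 <;> simp_all

def pvPatterns : List (List Char × List Char) :=
  [(['I','V'], ['4']), (['I','I','I'], ['3']), (['I','I'], ['2']), (['I'], ['1'])]

set_option maxRecDepth 4096 in
lemma pvCore (s : List Char) : pvPatLoop s pvPatterns = pvAltCore s := by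
  rw [← s.reverse_reverse]
  generalize s.reverse = r
  match r with
  | [] => rfl
  | [a] =>
    simp only [pvPatterns, pvPatLoop, pvAltCore, pvNormMap]
    by_cases hI : pvNorm a = 'I' <;>
      simp [pvIRun, hI, PySem.List.slice_from_neg_one,
        show PySem.Int.toChars 1 = ['1'] from by decide]
  | [a, b] =>
    have f1 : PySem.List.slice [b, a] (some (-1)) none = [a] := by
      rw [PySem.List.slice_from_neg_one]; rfl
    have f2 : PySem.List.slice [b, a] (some (-2)) none = [b, a] := by
      rw [PySem.List.slice_from_neg_ofNat _ 2 (by omega)]; rfl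
    simp only [pvPatterns, pvPatLoop, pvAltCore, pvNormMap]
    by_cases haV : pvNorm a = 'V' <;> by_cases haI : pvNorm a = 'I' <;>
    by_cases hbI : pvNorm b = 'I' <;>
      simp_all [pvIRun, f1, f2,
        show PySem.Int.toChars 1 = ['1'] from by decide,
        show PySem.Int.toChars 2 = ['2'] from by decide]
  | a :: b :: c :: t =>
    have e1 : PySem.List.slice (t.reverse ++ [c, b, a]) (some (-1)) none = [a] := by
      rw [show (t.reverse ++ [c, b, a]) = ((t.reverse ++ [c, b]) ++ [a]) by simp,
          PySem.List.slice_from_neg_one,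
          show ((t.reverse ++ [c, b]) ++ [a]).length - 1 = (t.reverse ++ [c, b]).length by simp]
      exact List.drop_left
    have e2 : PySem.List.slice (t.reverse ++ [c, b, a]) (some (-2)) none = [b, a] := by
      rw [show (t.reverse ++ [c, b, a]) = ((t.reverse ++ [c]) ++ [b, a]) by simp,
          PySem.List.slice_from_neg_ofNat _ 2 (by omega),
          show ((t.reverse ++ [c]) ++ [b, a]).length - 2 = (t.reverse ++ [c]).length by simp]
      exact List.drop_left
    have e3 : PySem.List.slice (t.reverse ++ [c, b, a]) (some (-3)) none = [c, b, a] := by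
      rw [PySem.List.slice_from_neg_ofNat _ 3 (by omega),
          show (t.reverse ++ [c, b, a]).length - 3 = t.reverse.length by simp]
      exact List.drop_left
    simp only [pvPatterns, pvPatLoop, pvAltCore, pvNormMap]
    by_cases haV : pvNorm a = 'V' <;> by_cases haI : pvNorm a = 'I' <;>
    by_cases hbI : pvNorm b = 'I' <;> by_cases hcI : pvNorm c = 'I' <;>
      simp_all [pvIRun, e1, e2, e3,
        show PySem.Int.toChars 1 = ['1'] from by decide,
        show PySem.Int.toChars 2 = ['2'] from by decide,
        show PySem.Int.toChars 3 = ['3'] from by decide]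

-- ===== VERDICT (by name: the statement is the Claim_ definition above) =====
theorem convert_trailing_roman_numeral_spec : Claim_equal_convert_trailing_roman_numeral := by
  intro name _
  unfold Spec_convert_trailing_roman_numeral
  unfold convert_trailing_roman_numeral convert_trailing_roman_numeral_alt
  have h := pvCore (PySem.Chars.rstrip name.toList)
  simp only [pvPatterns] at h
  simp only [h]
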